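-- pv_equiv track=rewrite | github.com/naiveai/adventofcode | python/2018/11/common.py | iter_areas
-- ===== SOURCE A (Python) =====
-- from collections import namedtuple
--
-- Point = namedtuple("Point", ["x", "y"])
--
-- def iter_all_points(grid_size):
--     for column in range(1, grid_size[1] + 1):
--         for row in range(1, grid_size[0] + 1):
--             yield Point(column, row)
--
-- def iter_areas(grid_size, area_size):
--     def get_area(point):
--         for column in range(point.x, point.x + area_size[1]):
--             for row in range(point.y, point.y + area_size[0]):
--                 if (column <= grid_size[1]) and (row <= grid_size[0]):
--                     yield Point(column, row)
--
--     for point in iter_all_points(grid_size):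
--         area = list(get_area(point))
--         if len(area) == (area_size[0] * area_size[1]):
--             yield area
-- ===== SOURCE B (Python) =====
-- from collections import namedtuple
--
-- Point = namedtuple("Point", ["x", "y"])
--
-- def iter_areas(grid_size, area_size):
--     height, width = area_size
--     if height > 0 and width > 0:
--         for column in range(1, grid_size[1] - width + 2):
--             for row in range(1, grid_size[0] - height + 2):
--                 yield [Point(c, r)
--                        for c in range(column, column + width)
--                        for r in range(row, row + height)]
-- ===== Notes on version B (the rewrite author's own statement) =====
-- stated objective: simpler
-- what changed: B computes the valid starting-point ranges in closed form and yields each full area directly, instead of building a bound-truncated area for every grid point and keeping only those whose length equals the expected product.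
-- intended difference: When area_size has a zero component and the grid is nonempty, A yields an empty list for every one of the grid's points (W*H copies of []), an accident of its length-equality filter; B yields nothing, the intended result since no fully-fitting positively-sized sub-area exists. — e.g. on iter_areas((1, 1), (0, 0)): A returns [[]], B returns []
import Mathlib
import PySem

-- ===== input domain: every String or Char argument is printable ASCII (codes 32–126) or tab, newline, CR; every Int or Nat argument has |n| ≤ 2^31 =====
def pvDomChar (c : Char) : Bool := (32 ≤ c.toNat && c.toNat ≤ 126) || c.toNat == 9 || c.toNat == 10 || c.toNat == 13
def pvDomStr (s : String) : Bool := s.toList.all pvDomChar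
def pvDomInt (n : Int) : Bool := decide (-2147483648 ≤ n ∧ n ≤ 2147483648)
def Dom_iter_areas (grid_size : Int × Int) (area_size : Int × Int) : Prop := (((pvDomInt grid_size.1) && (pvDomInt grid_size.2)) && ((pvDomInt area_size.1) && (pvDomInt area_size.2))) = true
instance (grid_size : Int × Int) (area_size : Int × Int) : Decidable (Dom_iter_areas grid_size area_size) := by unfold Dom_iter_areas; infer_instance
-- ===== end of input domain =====

-- B computes the valid starting-point ranges in closed form and yields each full area
-- directly, instead of truncating an area at every grid point and filtering by length
-- (objective: simpler).  On zero area-size components with a nonempty grid the two differ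
-- by design; see D_iter_areas below.

-- ===== PORT A =====
-- iter_all_points(grid_size)
def pvAllPoints (grid_size : Int × Int) : List (Int × Int) :=
  (PySem.List.pyRange 1 (grid_size.2 + 1) 1).flatMap (fun column =>
    (PySem.List.pyRange 1 (grid_size.1 + 1) 1).map (fun row => (column, row)))

-- get_area(point) (closure over grid_size, area_size)
def pvGetArea (grid_size : Int × Int) (area_size : Int × Int) (p : Int × Int) : List (Int × Int) :=
  (PySem.List.pyRange p.1 (p.1 + area_size.2) 1).flatMap (fun column =>
    (PySem.List.pyRange p.2 (p.2 + area_size.1) 1).filterMap (fun row =>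
      if column ≤ grid_size.2 ∧ row ≤ grid_size.1 then some (column, row) else none))

def iter_areas (grid_size : Int × Int) (area_size : Int × Int) : List (List (Int × Int)) :=
  (pvAllPoints grid_size).filterMap (fun p =>
    let area := pvGetArea grid_size area_size p
    if (area.length : Int) = area_size.1 * area_size.2 then some area else none)

-- ===== PORT B =====
def iter_areas_alt (grid_size : Int × Int) (area_size : Int × Int) : List (List (Int × Int)) :=
  if 0 < area_size.1 ∧ 0 < area_size.2 then
    (PySem.List.pyRange 1 (grid_size.2 - area_size.2 + 2) 1).flatMap (fun column =>
      (PySem.List.pyRange 1 (grid_size.1 - area_size.1 + 2) 1).map (fun row =>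
        (PySem.List.pyRange column (column + area_size.2) 1).flatMap (fun c =>
          (PySem.List.pyRange row (row + area_size.1) 1).map (fun r => (c, r)))))
  else []

-- ===== PRECONDITION & SPEC =====
-- When area_size has a zero component and the grid is nonempty, A yields an empty list for
-- every grid point (W*H copies of []), an accident of its length-equality filter; B yields
-- nothing, the intended result since no fully-fitting positively-sized sub-area exists.
def D_iter_areas (grid_size : Int × Int) (area_size : Int × Int) : Prop :=
  (area_size.1 = 0 ∨ area_size.2 = 0) ∧ 1 ≤ grid_size.1 ∧ 1 ≤ grid_size.2
instance (grid_size : Int × Int) (area_size : Int × Int) : Decidable (D_iter_areas grid_size area_size) := by unfold D_iter_areas; infer_instance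

def Spec_iter_areas (grid_size : Int × Int) (area_size : Int × Int) (out : List (List (Int × Int))) : Prop := ¬ D_iter_areas grid_size area_size → out = iter_areas_alt grid_size area_size
instance (grid_size : Int × Int) (area_size : Int × Int) (out : List (List (Int × Int))) : Decidable (Spec_iter_areas grid_size area_size out) := by unfold Spec_iter_areas; infer_instance

def pvDiffWitness_iter_areas : (Int × Int) × (Int × Int) := ((1, 1), (0, 0))
def pvDiffWitnessOut_iter_areas : (List (List (Int × Int))) × (List (List (Int × Int))) := ([[]], [])

-- ===== CLAIM (what is proved, stated in full; the proofs are below) =====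
def Claim_unchanged_iter_areas : Prop := ∀ (grid_size : Int × Int) (area_size : Int × Int), Dom_iter_areas grid_size area_size → Spec_iter_areas grid_size area_size (iter_areas grid_size area_size)
def Claim_changed_iter_areas : Prop := Dom_iter_areas (pvDiffWitness_iter_areas.1) (pvDiffWitness_iter_areas.2) ∧ D_iter_areas (pvDiffWitness_iter_areas.1) (pvDiffWitness_iter_areas.2) ∧ iter_areas (pvDiffWitness_iter_areas.1) (pvDiffWitness_iter_areas.2) = pvDiffWitnessOut_iter_areas.1 ∧ iter_areas_alt (pvDiffWitness_iter_areas.1) (pvDiffWitness_iter_areas.2) = pvDiffWitnessOut_iter_areas.2 ∧ pvDiffWitnessOut_iter_areas.1 ≠ pvDiffWitnessOut_iter_areas.2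
def Claim_exact_iter_areas : Prop := ∀ (grid_size : Int × Int) (area_size : Int × Int), Dom_iter_areas grid_size area_size → D_iter_areas grid_size area_size → iter_areas grid_size area_size ≠ iter_areas_alt grid_size area_size

-- ===== LEMMAS AND PROOFS =====

theorem pv_flatMap_congr {α β : Type} {l : List α} {f g : α → List β}
    (h : ∀ a ∈ l, f a = g a) : l.flatMap f = l.flatMap g := by
  induction l with
  | nil => rfl
  | cons a l ih =>
    simp only [List.flatMap_cons, h a (List.mem_cons_self), ih (fun x hx => h x (List.mem_cons_of_mem a hx))]

theorem pv_filterMap_congr {α β : Type} {l : List α} {f g : α → Option β}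
    (h : ∀ a ∈ l, f a = g a) : l.filterMap f = l.filterMap g := by
  induction l with
  | nil => rfl
  | cons a l ih =>
    simp only [List.filterMap_cons, h a (List.mem_cons_self), ih (fun x hx => h x (List.mem_cons_of_mem a hx))]

-- filterMap with an upper-bound test over a range = map over the clipped range
theorem pv_filterMap_le {α : Type} (g : Int) (f : Int → α) (n : Nat) :
    ∀ (a b : Int), (b - a).toNat ≤ n →
    (PySem.List.pyRange a b 1).filterMap (fun r => if r ≤ g then some (f r) else none)
      = (PySem.List.pyRange a (min b (g + 1)) 1).map f := by
  induction n with
  | zero =>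
    intro a b h
    rw [PySem.List.pyRange_one_eq_nil (by omega), PySem.List.pyRange_one_eq_nil (by omega)]
    rfl
  | succ n ih =>
    intro a b h
    by_cases hab : b ≤ a
    · rw [PySem.List.pyRange_one_eq_nil hab, PySem.List.pyRange_one_eq_nil (by omega)]
      rfl
    · have hab' : a < b := lt_of_not_ge hab
      rw [PySem.List.pyRange_one_cons hab']
      by_cases hg : a ≤ g
      · rw [PySem.List.pyRange_one_cons (by omega : a < min b (g + 1))]
        simp only [List.filterMap_cons, if_pos hg, List.map_cons]
        rw [ih (a + 1) b (by omega)]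
      · rw [PySem.List.pyRange_one_eq_nil (by omega : min b (g + 1) ≤ a)]
        simp only [List.filterMap_cons, if_neg hg]
        rw [ih (a + 1) b (by omega), PySem.List.pyRange_one_eq_nil (by omega : min b (g + 1) ≤ a + 1)]

theorem pv_filterMap_le' {α : Type} (g : Int) (f : Int → α) (a b : Int) :
    (PySem.List.pyRange a b 1).filterMap (fun r => if r ≤ g then some (f r) else none)
      = (PySem.List.pyRange a (min b (g + 1)) 1).map f :=
  pv_filterMap_le g f (b - a).toNat a b (le_refl _)

-- flatMap with an upper-bound test over a range = flatMap over the clipped range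
theorem pv_flatMap_le {α : Type} (g : Int) (F : Int → List α) (n : Nat) :
    ∀ (a b : Int), (b - a).toNat ≤ n →
    (PySem.List.pyRange a b 1).flatMap (fun c => if c ≤ g then F c else [])
      = (PySem.List.pyRange a (min b (g + 1)) 1).flatMap F := by
  induction n with
  | zero =>
    intro a b h
    rw [PySem.List.pyRange_one_eq_nil (by omega), PySem.List.pyRange_one_eq_nil (by omega)]
    rfl
  | succ n ih =>
    intro a b h
    by_cases hab : b ≤ a
    · rw [PySem.List.pyRange_one_eq_nil hab, PySem.List.pyRange_one_eq_nil (by omega)]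
      rfl
    · have hab' : a < b := lt_of_not_ge hab
      rw [PySem.List.pyRange_one_cons hab']
      by_cases hg : a ≤ g
      · rw [PySem.List.pyRange_one_cons (by omega : a < min b (g + 1))]
        simp only [List.flatMap_cons, if_pos hg]
        rw [ih (a + 1) b (by omega)]
      · rw [PySem.List.pyRange_one_eq_nil (by omega : min b (g + 1) ≤ a)]
        simp only [List.flatMap_cons, if_neg hg]
        rw [ih (a + 1) b (by omega), PySem.List.pyRange_one_eq_nil (by omega : min b (g + 1) ≤ a + 1)]
        simp

theorem pv_flatMap_le' {α : Type} (g : Int) (F : Int → List α) (a b : Int) :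
    (PySem.List.pyRange a b 1).flatMap (fun c => if c ≤ g then F c else [])
      = (PySem.List.pyRange a (min b (g + 1)) 1).flatMap F :=
  pv_flatMap_le g F (b - a).toNat a b (le_refl _)

-- the truncated area, in clipped-range form
theorem pv_getArea_eq (gs as : Int × Int) (x y : Int) :
    pvGetArea gs as (x, y)
      = (PySem.List.pyRange x (min (x + as.2) (gs.2 + 1)) 1).flatMap (fun c =>
          (PySem.List.pyRange y (min (y + as.1) (gs.1 + 1)) 1).map (fun r => (c, r))) := by
  unfold pvGetArea
  have h1 : ∀ c ∈ PySem.List.pyRange x (x + as.2) 1,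
      (PySem.List.pyRange y (y + as.1) 1).filterMap (fun row =>
        if c ≤ gs.2 ∧ row ≤ gs.1 then some (c, row) else none)
      = if c ≤ gs.2 then
          (PySem.List.pyRange y (min (y + as.1) (gs.1 + 1)) 1).map (fun r => (c, r)) else [] := by
    intro c _
    by_cases hc : c ≤ gs.2
    · simp only [hc, true_and, if_pos]
      exact pv_filterMap_le' gs.1 (fun r => (c, r)) y (y + as.1)
    · simp [hc]
  rw [pv_flatMap_congr h1, pv_flatMap_le' gs.2 _ x (x + as.2)]

theorem pv_len_flatMap (a b u v : Int) :
    (((PySem.List.pyRange a b 1).flatMap (fun c =>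
        (PySem.List.pyRange u v 1).map (fun r => (c, r)))).length)
      = (b - a).toNat * (v - u).toNat := by
  simp [List.length_flatMap, PySem.List.length_pyRange_one, List.map_const', List.sum_replicate]

-- arithmetic core: the clipped area has full size iff the area fits
theorem pv_minmul {x y g1 g2 h w : Int} (hx2 : x ≤ g2)
    (hy2 : y ≤ g1) (hh : 1 ≤ h) (hw : 1 ≤ w) :
    ((min (x + w) (g2 + 1) - x) * (min (y + h) (g1 + 1) - y) = h * w)
      ↔ (x + w ≤ g2 + 1 ∧ y + h ≤ g1 + 1) := by
  set C := min (x + w) (g2 + 1) - x with hC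
  set R := min (y + h) (g1 + 1) - y with hR
  have hC1 : 1 ≤ C := by omega
  have hCw : C ≤ w := by omega
  have hR1 : 1 ≤ R := by omega
  have hRh : R ≤ h := by omega
  constructor
  · intro hE
    constructor
    · by_contra hc
      have hC' : C ≤ w - 1 := by omega
      nlinarith
    · by_contra hc
      have hR' : R ≤ h - 1 := by omega
      nlinarith
  · intro hfits
    rw [show C = w by omega, show R = h by omega]
    ring

-- when a dimension of area_size is non-positive, every area is empty
theorem pv_getArea_empty (gs as : Int × Int) (p : Int × Int)
    (h : as.1 ≤ 0 ∨ as.2 ≤ 0) : pvGetArea gs as p = [] := by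
  unfold pvGetArea
  rcases h with h | h
  · apply List.flatMap_eq_nil_iff.mpr
    intro c _
    rw [PySem.List.pyRange_one_eq_nil (by omega : p.2 + as.1 ≤ p.2)]
    rfl
  · rw [PySem.List.pyRange_one_eq_nil (by omega : p.1 + as.2 ≤ p.1)]
    rfl

-- main equivalence on positive area sizes
theorem pv_main (gs as : Int × Int) (hh : 1 ≤ as.1) (hw : 1 ≤ as.2) :
    iter_areas gs as = iter_areas_alt gs as := by
  unfold iter_areas iter_areas_alt pvAllPoints
  rw [if_pos ⟨by omega, by omega⟩, List.filterMap_flatMap]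
  have houter : ∀ x ∈ PySem.List.pyRange 1 (gs.2 + 1) 1,
      ((PySem.List.pyRange 1 (gs.1 + 1) 1).map (fun row => (x, row))).filterMap (fun p =>
        let area := pvGetArea gs as p
        if (area.length : Int) = as.1 * as.2 then some area else none)
      = if x ≤ gs.2 - as.2 + 1 then
          (PySem.List.pyRange 1 (gs.1 - as.1 + 2) 1).map (fun y =>
            (PySem.List.pyRange x (x + as.2) 1).flatMap (fun c =>
              (PySem.List.pyRange y (y + as.1) 1).map (fun r => (c, r)))) else [] := by
    intro x hxmem
    have hx := (PySem.List.mem_pyRange_one).mp hxmem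
    rw [List.filterMap_map]
    by_cases hfit : x + as.2 ≤ gs.2 + 1
    · rw [if_pos (by omega)]
      have hinner : ∀ y ∈ PySem.List.pyRange 1 (gs.1 + 1) 1,
          ((fun p => let area := pvGetArea gs as p
            if (area.length : Int) = as.1 * as.2 then some area else none) ∘ (fun row => (x, row))) y
          = if y ≤ gs.1 - as.1 + 1 then
              some ((PySem.List.pyRange x (x + as.2) 1).flatMap (fun c =>
                (PySem.List.pyRange y (y + as.1) 1).map (fun r => (c, r)))) else none := by
        intro y hymem
        have hy := (PySem.List.mem_pyRange_one).mp hymem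
        have hiff := pv_minmul (x := x) (y := y) (g1 := gs.1) (g2 := gs.2)
          (h := as.1) (w := as.2) (by omega) (by omega) hh hw
        have hlen : ((pvGetArea gs as (x, y)).length : Int)
            = (min (x + as.2) (gs.2 + 1) - x) * (min (y + as.1) (gs.1 + 1) - y) := by
          rw [pv_getArea_eq, pv_len_flatMap]
          push_cast [Int.toNat_of_nonneg (by omega : (0:Int) ≤ min (x + as.2) (gs.2 + 1) - x),
            Int.toNat_of_nonneg (by omega : (0:Int) ≤ min (y + as.1) (gs.1 + 1) - y)]
          ring
        simp only [Function.comp_apply]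
        show (if ((pvGetArea gs as (x, y)).length : Int) = as.1 * as.2
            then some (pvGetArea gs as (x, y)) else none) = _
        by_cases hyfit : y ≤ gs.1 - as.1 + 1
        · rw [if_pos (by rw [hlen]; exact hiff.mpr ⟨hfit, by omega⟩), if_pos hyfit,
            pv_getArea_eq, min_eq_left (by omega), min_eq_left (by omega)]
        · rw [if_neg (by rw [hlen]; intro hc; exact hyfit (by have h2 := (hiff.mp hc).2; omega)),
            if_neg hyfit]
      rw [pv_filterMap_congr hinner,
        pv_filterMap_le' (gs.1 - as.1 + 1)
          (fun y => (PySem.List.pyRange x (x + as.2) 1).flatMap (fun c =>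
            (PySem.List.pyRange y (y + as.1) 1).map (fun r => (c, r)))) 1 (gs.1 + 1),
        min_eq_right (by omega), show gs.1 - as.1 + 1 + 1 = gs.1 - as.1 + 2 by ring]
    · rw [if_neg (by omega)]
      have hinner : ∀ y ∈ PySem.List.pyRange 1 (gs.1 + 1) 1,
          ((fun p => let area := pvGetArea gs as p
            if (area.length : Int) = as.1 * as.2 then some area else none) ∘ (fun row => (x, row))) y
          = (none : Option (List (Int × Int))) := by
        intro y hymem
        have hy := (PySem.List.mem_pyRange_one).mp hymem
        have hiff := pv_minmul (x := x) (y := y) (g1 := gs.1) (g2 := gs.2)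
          (h := as.1) (w := as.2) (by omega) (by omega) hh hw
        have hlen : ((pvGetArea gs as (x, y)).length : Int)
            = (min (x + as.2) (gs.2 + 1) - x) * (min (y + as.1) (gs.1 + 1) - y) := by
          rw [pv_getArea_eq, pv_len_flatMap]
          push_cast [Int.toNat_of_nonneg (by omega : (0:Int) ≤ min (x + as.2) (gs.2 + 1) - x),
            Int.toNat_of_nonneg (by omega : (0:Int) ≤ min (y + as.1) (gs.1 + 1) - y)]
          ring
        simp only [Function.comp_apply]
        show (if ((pvGetArea gs as (x, y)).length : Int) = as.1 * as.2
            then some (pvGetArea gs as (x, y)) else none) = none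
        rw [if_neg (by rw [hlen]; intro hc; exact hfit (hiff.mp hc).1)]
      rw [pv_filterMap_congr hinner]
      simp
  rw [pv_flatMap_congr houter,
    pv_flatMap_le' (gs.2 - as.2 + 1) _ 1 (gs.2 + 1), min_eq_right (by omega),
    show gs.2 - as.2 + 1 + 1 = gs.2 - as.2 + 2 by ring]

-- ===== VERDICT (by name: the statement is the Claim_ definition above) =====
theorem iter_areas_spec : Claim_unchanged_iter_areas := by
  intro gs as _ hD
  by_cases hpos : 1 ≤ as.1 ∧ 1 ≤ as.2
  · exact pv_main gs as hpos.1 hpos.2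
  · have hB : iter_areas_alt gs as = [] := by
      unfold iter_areas_alt
      rw [if_neg (by intro hc; exact hpos ⟨hc.1, hc.2⟩)]
    rw [hB]
    unfold D_iter_areas at hD
    by_cases hz : as.1 = 0 ∨ as.2 = 0
    · have hg : gs.1 ≤ 0 ∨ gs.2 ≤ 0 := by
        by_contra hcg
        exact hD ⟨hz, by omega, by omega⟩
      unfold iter_areas pvAllPoints
      rcases hg with hg | hg
      · simp [PySem.List.pyRange_one_eq_nil (by omega : (gs.1 : Int) + 1 ≤ 1)]
      · simp [PySem.List.pyRange_one_eq_nil (by omega : (gs.2 : Int) + 1 ≤ 1)]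
    · have hne : as.1 ≠ 0 ∧ as.2 ≠ 0 := by
        constructor <;> (intro hc ; exact hz (by omega))
      have hle : as.1 ≤ 0 ∨ as.2 ≤ 0 := by omega
      unfold iter_areas
      have hall : ∀ p ∈ pvAllPoints gs,
          (fun p => let area := pvGetArea gs as p
            if (area.length : Int) = as.1 * as.2 then some area else none) p
          = (none : Option (List (Int × Int))) := by
        intro p _
        show (if ((pvGetArea gs as p).length : Int) = as.1 * as.2
            then some (pvGetArea gs as p) else none) = none
        rw [pv_getArea_empty gs as p hle]
        simp only [List.length_nil, Nat.cast_zero]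
        rw [if_neg (fun hc => (mul_ne_zero hne.1 hne.2) hc.symm)]
      rw [pv_filterMap_congr hall]
      simp

theorem iter_areas_changed : Claim_changed_iter_areas := by
  unfold Claim_changed_iter_areas; decide

theorem iter_areas_tight : Claim_exact_iter_areas := by
  intro gs as _ hD
  obtain ⟨hz, hg1, hg2⟩ := hD
  have hB : iter_areas_alt gs as = [] := by
    unfold iter_areas_alt
    rw [if_neg (by intro hc; omega)]
  rw [hB]
  have hle : as.1 ≤ 0 ∨ as.2 ≤ 0 := by omega
  have hmem : ([] : List (Int × Int)) ∈ iter_areas gs as := by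
    unfold iter_areas
    apply List.mem_filterMap.mpr
    refine ⟨(1, 1), ?_, ?_⟩
    · unfold pvAllPoints
      exact List.mem_flatMap.mpr ⟨1, PySem.List.mem_pyRange_one.mpr ⟨le_refl _, by omega⟩,
        List.mem_map.mpr ⟨1, PySem.List.mem_pyRange_one.mpr ⟨le_refl _, by omega⟩, rfl⟩⟩
    · show (if ((pvGetArea gs as (1, 1)).length : Int) = as.1 * as.2
          then some (pvGetArea gs as (1, 1)) else none) = some []
      rw [pv_getArea_empty gs as (1, 1) hle]
      simp only [List.length_nil, Nat.cast_zero]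
      rw [if_pos (by rcases hz with h | h <;> simp [h])]
  intro hA
  rw [hA] at hmem
  exact List.not_mem_nil hmem
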